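-- pv_equiv track=rewrite | github.com/shellsec/gh-release-fetch | VibeCodingToolsDown/scripts/build_manifest.py | _pick_qoder_installers
-- ===== SOURCE A (Python) =====
-- def _pick_qoder_installers(hits: list[str]) -> tuple[str | None, str | None, str | None]:
--     """优先选 Qoder IDE 包，避免误选 QoderWork 独立应用（若仅有 Work 包则回退）。"""
--
--     def is_work(u: str) -> bool:
--         x = u.lower()
--         return "qoderwork" in x or "qoder-work" in x or "qoder_work" in x
--
--     win = next((h for h in hits if h.lower().endswith(".exe") and not is_work(h)), None) or next(
--         (h for h in hits if h.lower().endswith(".exe")), None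
--     )
--     mac = next((h for h in hits if h.lower().endswith(".dmg") and not is_work(h)), None) or next(
--         (h for h in hits if h.lower().endswith(".dmg")), None
--     )
--     lin = next((h for h in hits if h.lower().endswith((".deb", ".rpm", ".appimage"))), None)
--     return win, mac, lin
-- ===== SOURCE B (Python) =====
-- def _pick_qoder_installers(hits: list[str]) -> tuple[str | None, str | None, str | None]:
--     """Single pass over hits with five assign-once slots instead of five generator scans."""
--     win_pref = win_fall = mac_pref = mac_fall = lin = None
--     for h in hits:
--         low = h.lower()
--         work = "qoderwork" in low or "qoder-work" in low or "qoder_work" in low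
--         if win_pref is None and low.endswith(".exe") and not work:
--             win_pref = h
--         if win_fall is None and low.endswith(".exe"):
--             win_fall = h
--         if mac_pref is None and low.endswith(".dmg") and not work:
--             mac_pref = h
--         if mac_fall is None and low.endswith(".dmg"):
--             mac_fall = h
--         if lin is None and low.endswith((".deb", ".rpm", ".appimage")):
--             lin = h
--     return (win_pref if win_pref is not None else win_fall,
--             mac_pref if mac_pref is not None else mac_fall,
--             lin)
-- ===== Notes on version B (the rewrite author's own statement) =====
-- stated objective: alternative
-- what changed: Replaced A's five separate generator scans (with or-fallbacks) by a single loop over hits maintaining five assign-once slots (win preferred/fallback, mac preferred/fallback, linux), combined after the loop.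
import Mathlib
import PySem

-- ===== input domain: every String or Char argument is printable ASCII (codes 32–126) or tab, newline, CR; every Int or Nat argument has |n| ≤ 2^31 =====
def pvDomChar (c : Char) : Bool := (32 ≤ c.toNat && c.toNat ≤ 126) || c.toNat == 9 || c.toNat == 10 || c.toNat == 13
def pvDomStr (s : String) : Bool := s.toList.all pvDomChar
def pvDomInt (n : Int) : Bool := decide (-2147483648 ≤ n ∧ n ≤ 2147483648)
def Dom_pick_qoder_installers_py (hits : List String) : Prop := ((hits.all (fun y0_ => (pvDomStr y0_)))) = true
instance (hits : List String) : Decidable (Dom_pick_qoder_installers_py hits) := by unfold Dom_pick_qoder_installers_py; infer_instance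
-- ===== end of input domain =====

-- B replaces A's five generator scans by one pass with five assign-once slots; same result, different decomposition.


-- ===== PORT A =====
def pqIsWork (u : String) : Bool :=
  let x := PySem.Str.lower u
  PySem.Str.isIn "qoderwork" x || PySem.Str.isIn "qoder-work" x || PySem.Str.isIn "qoder_work" x

-- Python `x or y` on the two `next(...)` results is ported as Option.orElse: exact here, because a
-- matching element ends with ".exe"/".dmg" and so is never the falsy empty string.
def pick_qoder_installers_py (hits : List String) : Option String × Option String × Option String :=
  let win := (hits.find? (fun h => PySem.Str.endswith (PySem.Str.lower h) ".exe" && !pqIsWork h)).orElse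
      (fun _ => hits.find? (fun h => PySem.Str.endswith (PySem.Str.lower h) ".exe"))
  let mac := (hits.find? (fun h => PySem.Str.endswith (PySem.Str.lower h) ".dmg" && !pqIsWork h)).orElse
      (fun _ => hits.find? (fun h => PySem.Str.endswith (PySem.Str.lower h) ".dmg"))
  let lin := hits.find? (fun h =>
      PySem.Str.endswith (PySem.Str.lower h) ".deb" || PySem.Str.endswith (PySem.Str.lower h) ".rpm" ||
      PySem.Str.endswith (PySem.Str.lower h) ".appimage")
  (win, mac, lin)

-- ===== PORT B =====
-- one loop step: fill each still-empty slot on its first match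
def pqAltStep (st : Option String × Option String × Option String × Option String × Option String)
    (h : String) : Option String × Option String × Option String × Option String × Option String :=
  match st with
  | (wp, wf, mp, mf, l) =>
    let low := PySem.Str.lower h
    let work := PySem.Str.isIn "qoderwork" low || PySem.Str.isIn "qoder-work" low || PySem.Str.isIn "qoder_work" low
    ((if wp.isNone && (PySem.Str.endswith low ".exe" && !work) then some h else wp),
     (if wf.isNone && PySem.Str.endswith low ".exe" then some h else wf),
     (if mp.isNone && (PySem.Str.endswith low ".dmg" && !work) then some h else mp),
     (if mf.isNone && PySem.Str.endswith low ".dmg" then some h else mf),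
     (if l.isNone && (PySem.Str.endswith low ".deb" || PySem.Str.endswith low ".rpm" || PySem.Str.endswith low ".appimage") then some h else l))

def pick_qoder_installers_py_alt (hits : List String) : Option String × Option String × Option String :=
  match hits.foldl pqAltStep (none, none, none, none, none) with
  | (wp, wf, mp, mf, l) => (wp.orElse (fun _ => wf), mp.orElse (fun _ => mf), l)

-- ===== PRECONDITION & SPEC =====
def Spec_pick_qoder_installers_py (hits : List String) (out : Option String × Option String × Option String) : Prop := out = pick_qoder_installers_py_alt hits
instance (hits : List String) (out : Option String × Option String × Option String) : Decidable (Spec_pick_qoder_installers_py hits out) := by unfold Spec_pick_qoder_installers_py; infer_instance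

-- ===== CLAIM (what is proved, stated in full; the proofs are below) =====
def Claim_equal_pick_qoder_installers_py : Prop := ∀ (hits : List String), Dom_pick_qoder_installers_py hits → Spec_pick_qoder_installers_py hits (pick_qoder_installers_py hits)

-- ===== LEMMAS AND PROOFS =====

-- one step of an assign-once slot, from either state
theorem pqSlot (o : Option String) (p : String → Bool) (h : String) (t : List String) :
    ((if o.isNone && p h then some h else o).orElse (fun _ => t.find? p)) =
      o.orElse (fun _ => (h :: t).find? p) := by
  cases o <;> cases hp : p h <;> simp [hp, Option.orElse]

-- B's fold from an arbitrary state: each slot keeps its value if set, else takes the first match.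
theorem pqAltStep_fold_spec (hits : List String)
    (wp wf mp mf l : Option String) :
    hits.foldl pqAltStep (wp, wf, mp, mf, l) =
      (wp.orElse (fun _ => hits.find? (fun h => PySem.Str.endswith (PySem.Str.lower h) ".exe" &&
         !(PySem.Str.isIn "qoderwork" (PySem.Str.lower h) || PySem.Str.isIn "qoder-work" (PySem.Str.lower h) ||
           PySem.Str.isIn "qoder_work" (PySem.Str.lower h)))),
       wf.orElse (fun _ => hits.find? (fun h => PySem.Str.endswith (PySem.Str.lower h) ".exe")),
       mp.orElse (fun _ => hits.find? (fun h => PySem.Str.endswith (PySem.Str.lower h) ".dmg" &&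
         !(PySem.Str.isIn "qoderwork" (PySem.Str.lower h) || PySem.Str.isIn "qoder-work" (PySem.Str.lower h) ||
           PySem.Str.isIn "qoder_work" (PySem.Str.lower h)))),
       mf.orElse (fun _ => hits.find? (fun h => PySem.Str.endswith (PySem.Str.lower h) ".dmg")),
       l.orElse (fun _ => hits.find? (fun h =>
         PySem.Str.endswith (PySem.Str.lower h) ".deb" || PySem.Str.endswith (PySem.Str.lower h) ".rpm" ||
         PySem.Str.endswith (PySem.Str.lower h) ".appimage"))) := by
  induction hits generalizing wp wf mp mf l with
  | nil => cases wp <;> cases wf <;> cases mp <;> cases mf <;> cases l <;> simp [Option.orElse]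
  | cons h t ih =>
    simp only [List.foldl_cons, pqAltStep]
    rw [ih]
    simp only [Prod.mk.injEq]
    exact ⟨pqSlot wp (fun h => PySem.Str.endswith (PySem.Str.lower h) ".exe" &&
         !(PySem.Str.isIn "qoderwork" (PySem.Str.lower h) || PySem.Str.isIn "qoder-work" (PySem.Str.lower h) ||
           PySem.Str.isIn "qoder_work" (PySem.Str.lower h))) h t,
      pqSlot wf (fun h => PySem.Str.endswith (PySem.Str.lower h) ".exe") h t,
      pqSlot mp (fun h => PySem.Str.endswith (PySem.Str.lower h) ".dmg" &&
         !(PySem.Str.isIn "qoderwork" (PySem.Str.lower h) || PySem.Str.isIn "qoder-work" (PySem.Str.lower h) ||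
           PySem.Str.isIn "qoder_work" (PySem.Str.lower h))) h t,
      pqSlot mf (fun h => PySem.Str.endswith (PySem.Str.lower h) ".dmg") h t,
      pqSlot l (fun h => PySem.Str.endswith (PySem.Str.lower h) ".deb" || PySem.Str.endswith (PySem.Str.lower h) ".rpm" ||
         PySem.Str.endswith (PySem.Str.lower h) ".appimage") h t⟩

-- ===== VERDICT (by name: the statement is the Claim_ definition above) =====
theorem pick_qoder_installers_py_spec : Claim_equal_pick_qoder_installers_py := by
  intro hits _
  unfold Spec_pick_qoder_installers_py pick_qoder_installers_py pick_qoder_installers_py_alt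
  simp only [pqIsWork]
  rw [pqAltStep_fold_spec]
  simp [Option.orElse]
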